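-- pv_equiv track=rewrite | github.com/OhRelaxo/IP-Adress-Tools | Tools/shorten_lengthen_ipv6/shorten.py | calc_zero_blocks
-- ===== SOURCE A (Python) =====
-- def calc_zero_blocks(ipv6):
--     zero_blocks = []
--     block = []
--     for i in range(0, len(ipv6)):
--         octet = ipv6[i]
--         if octet.startswith("0") and len(octet) == 1:
--             block.append(i)
--         else:
--             if len(block) > 1:
--                 zero_blocks.append(block)
--             block = []
--
--     if len(block) > 1:
--         zero_blocks.append(block)
--
--     return zero_blocks
-- ===== SOURCE B (Python) =====
-- def calc_zero_blocks(ipv6):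
--     res = []
--     n = len(ipv6)
--     i = 0
--     while i < n:
--         if ipv6[i] == "0":
--             j = i + 1
--             while j < n and ipv6[j] == "0":
--                 j += 1
--             if j - i > 1:
--                 res.append(list(range(i, j)))
--             i = j
--         else:
--             i += 1
--     return res
-- ===== Notes on version B (the rewrite author's own statement) =====
-- stated objective: alternative
-- what changed: Replaces A's per-element accumulator/flush state machine (growing a block list and resetting it) by a two-pointer run scanner: find a zero octet, advance a second index to the run's end, and emit list(range(i, j)) directly when the run is longer than 1.
import Mathlib
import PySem

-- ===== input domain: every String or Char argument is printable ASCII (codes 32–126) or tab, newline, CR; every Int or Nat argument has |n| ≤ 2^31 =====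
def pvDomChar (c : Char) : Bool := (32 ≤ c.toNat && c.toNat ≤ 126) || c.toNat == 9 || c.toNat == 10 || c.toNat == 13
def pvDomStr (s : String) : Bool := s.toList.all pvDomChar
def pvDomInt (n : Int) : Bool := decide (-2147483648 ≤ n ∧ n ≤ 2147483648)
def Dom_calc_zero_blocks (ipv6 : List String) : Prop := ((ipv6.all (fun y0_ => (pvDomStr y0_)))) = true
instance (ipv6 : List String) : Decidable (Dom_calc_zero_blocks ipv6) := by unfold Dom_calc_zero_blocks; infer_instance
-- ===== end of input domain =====

-- B replaces A's block-accumulator/flush state machine by a two-pointer run scan (alternative decomposition, same cost).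

-- ===== PORT A =====
def calc_zero_blocks (ipv6 : List String) : List (List Int) :=
  let st := (PySem.List.pyRange 0 (PySem.List.len ipv6) 1).foldl
    (fun (s : List (List Int) × List Int) i =>
      let octet := PySem.List.pyGetD ipv6 i ""
      if PySem.Str.startswith octet "0" && PySem.Str.len octet == 1 then
        (s.1, s.2 ++ [i])
      else if s.2.length > 1 then (s.1 ++ [s.2], ([] : List Int))
      else (s.1, ([] : List Int)))
    (([], []) : List (List Int) × List Int)
  if st.2.length > 1 then st.1 ++ [st.2] else st.1

-- ===== PORT B =====
-- inner 'while j < n and ipv6[j] == "0"' (index always in range, so getD is exact)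
def pvAltSkip (ipv6 : List String) (j : Nat) : Nat :=
  if j < ipv6.length && (ipv6.getD j "" == "0") then pvAltSkip ipv6 (j + 1) else j
termination_by ipv6.length - j
decreasing_by
  rename_i h; simp only [Bool.and_eq_true, decide_eq_true_eq] at h; omega

theorem pvAltSkip_ge (ipv6 : List String) (j : Nat) : j ≤ pvAltSkip ipv6 j := by
  fun_induction pvAltSkip ipv6 j with
  | case1 j h ih => omega
  | case2 j h => omega

-- outer while loop of B, carrying the result accumulator
def pvAltLoop (ipv6 : List String) (i : Nat) (res : List (List Int)) : List (List Int) :=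
  if i < ipv6.length then
    if ipv6.getD i "" == "0" then
      let j := pvAltSkip ipv6 (i + 1)
      pvAltLoop ipv6 j
        (if j - i > 1 then res ++ [PySem.List.pyRange (i : Int) (j : Int) 1] else res)
    else pvAltLoop ipv6 (i + 1) res
  else res
termination_by ipv6.length - i
decreasing_by
  · have := pvAltSkip_ge ipv6 (i + 1); omega
  · omega

def calc_zero_blocks_alt (ipv6 : List String) : List (List Int) :=
  pvAltLoop ipv6 0 []

-- ===== PRECONDITION & SPEC =====
def Spec_calc_zero_blocks (ipv6 : List String) (out : List (List Int)) : Prop := out = calc_zero_blocks_alt ipv6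
instance (ipv6 : List String) (out : List (List Int)) : Decidable (Spec_calc_zero_blocks ipv6 out) := by unfold Spec_calc_zero_blocks; infer_instance

-- ===== CLAIM (what is proved, stated in full; the proofs are below) =====
def Claim_equal_calc_zero_blocks : Prop := ∀ (ipv6 : List String), Dom_calc_zero_blocks ipv6 → Spec_calc_zero_blocks ipv6 (calc_zero_blocks ipv6)

-- ===== LEMMAS AND PROOFS =====

-- A's loop body, as a step function on (zero_blocks, block)
def pvStep (i : Int) (octet : String) (s : List (List Int) × List Int) : List (List Int) × List Int :=
  if PySem.Str.startswith octet "0" && PySem.Str.len octet == 1 then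
    (s.1, s.2 ++ [i])
  else if s.2.length > 1 then (s.1 ++ [s.2], ([] : List Int))
  else (s.1, ([] : List Int))

-- A's loop as structural recursion over the list with a running index
def pvLoopA : List String → Int → (List (List Int) × List Int) → List (List Int) × List Int
  | [], _, s => s
  | x :: xs, i, s => pvLoopA xs (i + 1) (pvStep i x s)

def pvFin (s : List (List Int) × List Int) : List (List Int) :=
  if s.2.length > 1 then s.1 ++ [s.2] else s.1

-- length of the leading run of "0"
def pvRunlen : List String → Nat
  | [] => 0
  | x :: xs => if x == "0" then pvRunlen xs + 1 else 0

-- common bridge: result contributed by a pending zero-run of length k ending just before index i, followed by l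
def pvH : List String → Int → Nat → List (List Int)
  | [], i, k => if k > 1 then [PySem.List.pyRange (i - (k : Int)) i 1] else []
  | x :: xs, i, k =>
    if x == "0" then pvH xs (i + 1) (k + 1)
    else (if k > 1 then [PySem.List.pyRange (i - (k : Int)) i 1] else []) ++ pvH xs (i + 1) 0

theorem pvCond_eq (x : String) :
    (PySem.Str.startswith x "0" && PySem.Str.len x == 1) = (x == "0") := by
  by_cases h : x = "0"
  · subst h; decide
  · have hx : (x == "0") = false := by simp [h]
    rw [hx]
    by_contra hc
    simp only [Bool.not_eq_false, Bool.and_eq_true, beq_iff_eq] at hc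
    obtain ⟨h1, h2⟩ := hc
    rw [PySem.Str.startswith_eq] at h1
    have hp : ("0" : String).toList <+: x.toList := (PySem.Chars.startswith_iff _ _).mp h1
    rw [PySem.Str.len_eq] at h2
    have hlen : x.toList.length = 1 := by exact_mod_cast h2
    have hl0 : ("0" : String).toList.length = 1 := by decide
    have heq : ("0" : String).toList = x.toList := hp.eq_of_length (by omega)
    exact h (String.toList_injective heq.symm)

theorem pv_drop_cons {l : List String} {j : Nat} (hj : j < l.length) :
    l.drop j = l.getD j "" :: l.drop (j + 1) := by
  rw [List.drop_eq_getElem_cons hj, List.getD_eq_getElem?_getD, List.getElem?_eq_getElem hj]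
  rfl

theorem pvLoopA_inv (l : List String) : ∀ (i : Int) (k : Nat) (zb : List (List Int)),
    pvFin (pvLoopA l i (zb, PySem.List.pyRange (i - (k : Int)) i 1)) = zb ++ pvH l i k := by
  induction l with
  | nil =>
    intro i k zb
    simp only [pvLoopA, pvFin, pvH, PySem.List.length_pyRange_one]
    have : (i - (i - (k : Int))).toNat = k := by omega
    rw [this]
    split <;> simp
  | cons x xs ih =>
    intro i k zb
    simp only [pvLoopA, pvStep, pvCond_eq, pvH]
    by_cases hx : x = "0"
    · simp only [hx, beq_self_eq_true, if_true]
      have hr : PySem.List.pyRange (i - (k : Int)) i 1 ++ [i]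
          = PySem.List.pyRange ((i + 1) - ((k + 1 : Nat) : Int)) (i + 1) 1 := by
        have h1 : ((i + 1) - ((k + 1 : Nat) : Int)) = i - (k : Int) := by push_cast; ring
        rw [h1, ← PySem.List.pyRange_one_succ_right (by omega)]
      rw [hr, ih]
    · have hx' : (x == "0") = false := by simp [hx]
      simp only [hx', if_false, Bool.false_eq_true, PySem.List.length_pyRange_one]
      have hk : (i - (i - (k : Int))).toNat = k := by omega
      rw [hk]
      have hnil : ([] : List Int) = PySem.List.pyRange ((i + 1) - ((0 : Nat) : Int)) (i + 1) 1 := by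
        rw [PySem.List.pyRange_one_eq_nil (by omega)]
      by_cases hk1 : k > 1
      · simp only [hk1, if_true]
        rw [hnil, ih (i + 1) 0 (zb ++ [PySem.List.pyRange (i - (k : Int)) i 1])]
        simp
      · simp only [hk1, if_false]
        rw [hnil, ih (i + 1) 0 zb]
        simp

theorem pvLoopA_eq_enum (l : List String) : ∀ (i : Int) (s : List (List Int) × List Int),
    (PySem.List.enumerate l i).foldl (fun s p => pvStep p.1 p.2 s) s = pvLoopA l i s := by
  induction l with
  | nil => intro i s; simp [PySem.List.enumerate_nil, pvLoopA]
  | cons x xs ih => intro i s; rw [PySem.List.enumerate_cons]; simp only [List.foldl_cons]; rw [ih]; rfl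

theorem pvA_eq (ipv6 : List String) :
    calc_zero_blocks ipv6 = pvFin (pvLoopA ipv6 0 ([], [])) := by
  unfold calc_zero_blocks
  have hmap := PySem.List.enumerate_eq_map_pyRange (xs := ipv6) (d := "")
  have h1 : (PySem.List.pyRange 0 (PySem.List.len ipv6) 1).foldl
      (fun (s : List (List Int) × List Int) i =>
        let octet := PySem.List.pyGetD ipv6 i ""
        if PySem.Str.startswith octet "0" && PySem.Str.len octet == 1 then
          (s.1, s.2 ++ [i])
        else if s.2.length > 1 then (s.1 ++ [s.2], ([] : List Int))
        else (s.1, ([] : List Int)))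
      (([], []) : List (List Int) × List Int)
      = (PySem.List.enumerate ipv6 0).foldl (fun s p => pvStep p.1 p.2 s) ([], []) := by
    rw [hmap, List.foldl_map]; rfl
  rw [h1, pvLoopA_eq_enum]
  rfl

theorem pvRunlen_le (l : List String) : pvRunlen l ≤ l.length := by
  induction l with
  | nil => simp [pvRunlen]
  | cons x xs ih => simp only [pvRunlen]; split <;> simp <;> omega

theorem pvAltSkip_eq (ipv6 : List String) (j : Nat) :
    pvAltSkip ipv6 j = j + pvRunlen (ipv6.drop j) := by
  fun_induction pvAltSkip ipv6 j with
  | case1 j h ih =>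
    simp only [Bool.and_eq_true, decide_eq_true_eq, beq_iff_eq] at h
    obtain ⟨hj, hz⟩ := h
    rw [pv_drop_cons hj, pvRunlen, hz]
    simp only [beq_self_eq_true, if_true]
    omega
  | case2 j h =>
    simp only [Bool.and_eq_true, decide_eq_true_eq, beq_iff_eq, not_and] at h
    by_cases hj : j < ipv6.length
    · have hz' : (ipv6.getD j "" == "0") = false := beq_eq_false_iff_ne.mpr (h hj)
      rw [pv_drop_cons hj, pvRunlen, hz']
      simp
    · rw [List.drop_eq_nil_of_le (by omega)]; simp [pvRunlen]

-- pvH with pending k, unfolded across the whole leading zero-run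
theorem pvH_unfold (l : List String) : ∀ (i : Int) (k : Nat),
    pvH l i k = (if k + pvRunlen l > 1 then
        [PySem.List.pyRange (i - (k : Int)) (i + (pvRunlen l : Int)) 1] else [])
      ++ pvH (l.drop (pvRunlen l)) (i + (pvRunlen l : Int)) 0 := by
  induction l with
  | nil => intro i k; simp [pvH, pvRunlen]
  | cons x xs ih =>
    intro i k
    by_cases hx : x = "0"
    · have hr : pvRunlen (x :: xs) = pvRunlen xs + 1 := by simp [pvRunlen, hx]
      rw [pvH]
      simp only [hx, beq_self_eq_true, if_true, hr]
      rw [ih (i + 1) (k + 1)]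
      have e1 : (i + 1) - ((k + 1 : Nat) : Int) = i - (k : Int) := by push_cast; ring
      have e2 : (i + 1) + ((pvRunlen xs : Nat) : Int) = i + ((pvRunlen xs + 1 : Nat) : Int) := by
        push_cast; ring
      have e3 : k + 1 + pvRunlen xs = k + (pvRunlen xs + 1) := by omega
      rw [e1, e2, e3]
      rfl
    · have hr : pvRunlen (x :: xs) = 0 := by simp [pvRunlen, hx]
      rw [hr]
      simp only [List.drop_zero, Nat.add_zero, Int.natCast_zero, Int.add_zero]
      rw [pvH]
      have hx' : (x == "0") = false := by simp [hx]
      rw [hx']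
      simp only [Bool.false_eq_true, if_false]
      by_cases hk1 : k > 1
      · simp only [hk1, if_true]
        rw [pvH, hx']
        simp
      · simp only [hk1, if_false]
        rw [pvH, hx']
        simp

theorem pvAltLoop_eq (ipv6 : List String) : ∀ (i : Nat) (res : List (List Int)),
    pvAltLoop ipv6 i res = res ++ pvH (ipv6.drop i) (i : Int) 0 := by
  have main : ∀ (fuel : Nat) (i : Nat) (res : List (List Int)), ipv6.length - i ≤ fuel →
      pvAltLoop ipv6 i res = res ++ pvH (ipv6.drop i) (i : Int) 0 := by
    intro fuel
    induction fuel with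
    | zero =>
      intro i res hf
      rw [pvAltLoop]
      have hi : ¬ i < ipv6.length := by omega
      rw [List.drop_eq_nil_of_le (by omega)]
      simp [hi, pvH]
    | succ n ih =>
      intro i res hf
      rw [pvAltLoop]
      by_cases hi : i < ipv6.length
      · simp only [hi, if_true]
        have hd : ipv6.drop i = ipv6.getD i "" :: ipv6.drop (i + 1) := pv_drop_cons hi
        by_cases hz : ipv6.getD i "" = "0"
        · simp only [hz, beq_self_eq_true, if_true]
          have hskip := pvAltSkip_eq ipv6 (i + 1)
          set r := pvRunlen (List.drop (i + 1) ipv6) with hrdef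
          have hge : i + 1 ≤ pvAltSkip ipv6 (i + 1) := pvAltSkip_ge ipv6 (i + 1)
          have hle : r ≤ ipv6.length - (i + 1) := by
            have := pvRunlen_le (ipv6.drop (i + 1)); simpa using this
          have hz2 : (ipv6.getD i "" == "0") = true := beq_iff_eq.mpr hz
          have hrun : pvRunlen (ipv6.getD i "" :: List.drop (i + 1) ipv6) = r + 1 := by
            simp only [pvRunlen, hz2, if_true]
            rw [hrdef]
          rw [ih (pvAltSkip ipv6 (i + 1)) _ (by omega)]
          conv_rhs => rw [hd, pvH_unfold, hrun]
          have hdrop : (ipv6.getD i "" :: List.drop (i + 1) ipv6).drop (r + 1)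
              = ipv6.drop (pvAltSkip ipv6 (i + 1)) := by
            simp only [List.drop_succ_cons, List.drop_drop, hskip]
          have hsub : pvAltSkip ipv6 (i + 1) - i = r + 1 := by omega
          have hcast1 : ((pvAltSkip ipv6 (i + 1) : Nat) : Int) = (i : Int) + ((r + 1 : Nat) : Int) := by
            rw [hskip]; push_cast; ring
          have hcast2 : (i : Int) - ((0 : Nat) : Int) = (i : Int) := by push_cast; ring
          rw [hdrop, hsub, hcast1, hcast2, Nat.zero_add]
          split_ifs <;> simp
        · have hz' : (ipv6.getD i "" == "0") = false := beq_eq_false_iff_ne.mpr hz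
          rw [hz']
          simp only [Bool.false_eq_true, if_false]
          rw [ih (i + 1) res (by omega)]
          rw [hd, pvH, hz']
          simp only [Bool.false_eq_true, if_false, gt_iff_lt]
          have : ((i : Nat) : Int) + 1 = (((i + 1 : Nat)) : Int) := by push_cast; ring
          rw [this]
          simp
      · simp only [hi, if_false]
        rw [List.drop_eq_nil_of_le (by omega)]
        simp [pvH]
  intro i res
  exact main (ipv6.length - i) i res (le_refl _)

-- ===== VERDICT (by name: the statement is the Claim_ definition above) =====
theorem calc_zero_blocks_spec : Claim_equal_calc_zero_blocks := by
  intro ipv6 _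
  unfold Spec_calc_zero_blocks
  rw [pvA_eq]
  have h0 : ([] : List Int) = PySem.List.pyRange ((0 : Int) - ((0 : Nat) : Int)) 0 1 := by
    rw [PySem.List.pyRange_one_eq_nil (by omega)]
  unfold calc_zero_blocks_alt
  rw [pvAltLoop_eq ipv6 0 []]
  rw [show (pvLoopA ipv6 0 ([], [])) = pvLoopA ipv6 0 ([], PySem.List.pyRange ((0:Int) - ((0:Nat):Int)) 0 1) by rw [← h0]]
  rw [pvLoopA_inv ipv6 0 0 []]
  simp
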